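-- pv_equiv track=rewrite | github.com/youssef-S-Elmahdy/PDF_Extractor_v2 | src/pdf_extractor/output.py | _collapse_header
-- ===== SOURCE A (Python) =====
-- from typing import Dict, List, Optional
--
-- def _collapse_header(header: List[str]) -> tuple[List[str], List[int]]:
--     if not header:
--         return header, []
--     non_empty_indices = [idx for idx, value in enumerate(header) if value.strip()]
--     if not non_empty_indices:
--         return header, list(range(len(header)))
--     collapsed = [header[idx] for idx in non_empty_indices]
--     index_map = {idx: pos for pos, idx in enumerate(non_empty_indices)}
--     mapping: List[int] = []
--     for idx, value in enumerate(header):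
--         if value.strip():
--             mapping.append(index_map[idx])
--             continue
--         left = next((i for i in reversed(non_empty_indices) if i < idx), None)
--         right = next((i for i in non_empty_indices if i > idx), None)
--         if left is not None:
--             mapping.append(index_map[left])
--         elif right is not None:
--             mapping.append(index_map[right])
--         else:
--             mapping.append(0)
--     return collapsed, mapping
-- ===== SOURCE B (Python) =====
-- def _collapse_header(header):
--     collapsed = []
--     mapping = []
--     last = -1
--     for value in header:
--         if value.strip():
--             collapsed.append(value)
--             last = len(collapsed) - 1
--             mapping.append(last)
--         else:
--             mapping.append(last if last >= 0 else 0)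
--     if not collapsed:
--         return header, list(range(len(header)))
--     return collapsed, mapping
-- ===== Notes on version B (the rewrite author's own statement) =====
-- stated objective: faster
-- what changed: replaces the precomputed non-empty index list, the position dict and the per-empty-cell linear scans for the nearest non-empty neighbour by a single forward pass that tracks the position of the last non-empty cell seen (leading empties fall back to position 0)
import Mathlib
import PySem

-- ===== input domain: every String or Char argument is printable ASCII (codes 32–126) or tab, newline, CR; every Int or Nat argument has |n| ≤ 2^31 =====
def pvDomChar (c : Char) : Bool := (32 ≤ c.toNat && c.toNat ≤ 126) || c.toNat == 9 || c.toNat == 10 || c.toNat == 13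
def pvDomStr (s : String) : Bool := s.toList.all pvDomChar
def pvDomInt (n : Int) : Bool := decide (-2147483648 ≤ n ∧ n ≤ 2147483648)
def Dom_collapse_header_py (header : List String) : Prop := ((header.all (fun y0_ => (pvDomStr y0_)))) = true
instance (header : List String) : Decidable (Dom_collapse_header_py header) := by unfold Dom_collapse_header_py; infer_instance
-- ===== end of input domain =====

-- B replaces A's non-empty index list, position dict and per-empty-cell linear neighbour scans by a
-- single forward pass tracking the last non-empty position (objective: faster).

-- ===== PORT A =====
-- Python truthiness of value.strip() (shared by both ports; both Pythons write 'if value.strip():')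
def pvNE (s : String) : Bool := PySem.Str.strip s ≠ ""

-- A's non_empty_indices comprehension '[idx for idx, value in enumerate(header, s) if value.strip()]'
def pvNeiF (s : Int) (l : List String) : List Int :=
  ((PySem.List.enumerate l s).filter (fun p => pvNE p.2)).map (fun p => p.1)

-- A's index_map comprehension '{idx: pos for pos, idx in enumerate(non_empty_indices)}'
def pvBuildD (xs : List Int) : PySem.Dict Int Int :=
  (PySem.List.enumerate xs 0).foldl (fun d p => d.insert p.2 p.1) PySem.Dict.empty

-- the value one iteration of A's mapping loop appends for cell p = (idx, value)
-- (index_map.getD is exact: every looked-up key is in non_empty_indices, so Python's d[k] never raises)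
def pvGval (nei : List Int) (index_map : PySem.Dict Int Int) (idx : Int) (value : String) : Int :=
  if pvNE value then index_map.getD idx 0
  else
    match nei.reverse.find? (fun i => decide (i < idx)) with
    | some left => index_map.getD left 0
    | none =>
      match nei.find? (fun i => decide (idx < i)) with
      | some right => index_map.getD right 0
      | none => 0

-- literal port of A; header[idx] for idx drawn from enumerate(header) is always in range, so
-- PySem.List.pyGetD with default "" is exact there
def collapse_header_py (header : List String) : List String × List Int :=
  if header = [] then (header, [])
  else
    let nei : List Int := pvNeiF 0 header
    if nei = [] then (header, PySem.List.pyRange 0 (header.length : Int) 1)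
    else
      let collapsed := nei.map (fun idx => PySem.List.pyGetD header idx "")
      let index_map : PySem.Dict Int Int := pvBuildD nei
      let mapping : List Int :=
        (PySem.List.enumerate header 0).foldl (fun acc p => acc ++ [pvGval nei index_map p.1 p.2]) []
      (collapsed, mapping)

-- ===== PORT B =====
-- B's loop body: state = (collapsed, mapping, last)
def pvStepB (s : List String × List Int × Int) (v : String) : List String × List Int × Int :=
  if pvNE v then
    let c := s.1 ++ [v]
    (c, s.2.1 ++ [(c.length : Int) - 1], (c.length : Int) - 1)
  else
    (s.1, s.2.1 ++ [if 0 ≤ s.2.2 then s.2.2 else 0], s.2.2)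

def collapse_header_py_alt (header : List String) : List String × List Int :=
  let st := header.foldl pvStepB ([], [], -1)
  if st.1 = [] then (header, PySem.List.pyRange 0 (header.length : Int) 1)
  else (st.1, st.2.1)

-- ===== PRECONDITION & SPEC =====
def Spec_collapse_header_py (header : List String) (out : List String × List Int) : Prop := out = collapse_header_py_alt header
instance (header : List String) (out : List String × List Int) : Decidable (Spec_collapse_header_py header out) := by unfold Spec_collapse_header_py; infer_instance

-- ===== CLAIM (what is proved, stated in full; the proofs are below) =====
def Claim_equal_collapse_header_py : Prop := ∀ (header : List String), Dom_collapse_header_py header → Spec_collapse_header_py header (collapse_header_py header)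

-- ===== LEMMAS AND PROOFS =====

-- number of non-empty cells
def pvCnt (l : List String) : Nat := (l.filter pvNE).length

-- the value both mappings hold at position k
def pvMval (l : List String) (k : Nat) : Int :=
  if pvCnt (l.take (k+1)) = 0 then 0 else (pvCnt (l.take (k+1)) : Int) - 1

theorem pvNeiF_nil (s : Int) : pvNeiF s [] = [] := rfl

theorem pvNeiF_cons (s : Int) (v : String) (t : List String) :
    pvNeiF s (v :: t) = (if pvNE v then [s] else []) ++ pvNeiF (s+1) t := by
  by_cases h : pvNE v <;> simp [pvNeiF, PySem.List.enumerate_cons, h]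

theorem pvNeiF_append (s : Int) (a b : List String) :
    pvNeiF s (a ++ b) = pvNeiF s a ++ pvNeiF (s + a.length) b := by
  simp [pvNeiF, PySem.List.enumerate_append]

theorem length_pvNeiF (s : Int) (l : List String) : (pvNeiF s l).length = pvCnt l := by
  induction l generalizing s with
  | nil => rfl
  | cons v t ih =>
      rw [pvNeiF_cons]
      have h2 := ih (s+1)
      by_cases h : pvNE v <;> simp [pvCnt, h] at h2 ⊢ <;> omega

theorem mem_pvNeiF (s : Int) (l : List String) (i : Int) (hi : i ∈ pvNeiF s l) :
    s ≤ i ∧ i < s + l.length := by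
  induction l generalizing s with
  | nil => simp [pvNeiF] at hi
  | cons v t ih =>
      rw [pvNeiF_cons] at hi
      rcases List.mem_append.1 hi with h | h
      · have hi' : i = s := by by_cases hv : pvNE v <;> simp [hv] at h; exact h
        subst hi'; refine ⟨le_refl _, ?_⟩; push_cast [List.length_cons]; omega
      · have h2 := ih (s+1) h; push_cast [List.length_cons] at h2 ⊢; omega

theorem pairwise_pvNeiF (s : Int) (l : List String) : (pvNeiF s l).Pairwise (· < ·) := by
  have h1 : (PySem.List.enumerate l s).Pairwise (fun p q => p.1 < q.1) :=
    PySem.List.pairwise_lt_enumerate l s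
  have h2 := h1.filter (fun p => pvNE p.2)
  simpa [pvNeiF, List.pairwise_map] using h2

theorem get?_pvBuildD_notmem (xs : List Int) (v : Int) (hv : v ∉ xs) :
    ∀ (s : Int) (d : PySem.Dict Int Int),
    ((PySem.List.enumerate xs s).foldl (fun d p => d.insert p.2 p.1) d).get? v = d.get? v := by
  induction xs with
  | nil => intro s d; rfl
  | cons x t ih =>
      intro s d
      obtain ⟨hne, hnt⟩ : v ≠ x ∧ v ∉ t := by simpa using hv
      rw [PySem.List.enumerate_cons]
      simp only [List.foldl_cons]
      rw [ih hnt (s+1) _]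
      exact PySem.Dict.get?_insert_of_ne _ _ hne

theorem get?_pvBuildD (pre suf : List Int) (v : Int) (h1 : v ∉ pre) (h2 : v ∉ suf) :
    ∀ (s : Int) (d : PySem.Dict Int Int),
    ((PySem.List.enumerate (pre ++ v :: suf) s).foldl (fun d p => d.insert p.2 p.1) d).get? v
      = some (s + pre.length) := by
  induction pre with
  | nil =>
      intro s d
      rw [List.nil_append, PySem.List.enumerate_cons]
      simp only [List.foldl_cons]
      rw [get?_pvBuildD_notmem _ _ h2, PySem.Dict.get?_insert_self]
      simp
  | cons a t ih =>
      intro s d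
      obtain ⟨hna, hnt⟩ : v ≠ a ∧ v ∉ t := by simpa using h1
      rw [List.cons_append, PySem.List.enumerate_cons]
      simp only [List.foldl_cons]
      rw [ih hnt (s+1) _]
      congr 1; push_cast [List.length_cons]; ring

theorem getD_pvBuildD (pre suf : List Int) (v : Int) (h1 : v ∉ pre) (h2 : v ∉ suf) :
    (pvBuildD (pre ++ v :: suf)).getD v 0 = (pre.length : Int) := by
  simp [pvBuildD, PySem.Dict.getD, get?_pvBuildD pre suf v h1 h2 0 PySem.Dict.empty]

-- collapsed = [header[i] for i in nei] is the filtered header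
theorem map_pyGetD_pvNeiF (t pfx : List String) :
    (pvNeiF (pfx.length : Int) t).map (fun i => PySem.List.pyGetD (pfx ++ t) i "")
      = t.filter pvNE := by
  induction t generalizing pfx with
  | nil => simp [pvNeiF_nil]
  | cons v t' ih =>
      rw [pvNeiF_cons, List.map_append]
      have hget : PySem.List.pyGetD (pfx ++ v :: t') (pfx.length : Int) "" = v := by
        rw [PySem.List.pyGetD_natCast]
        simp [List.getD]
      have hrec := ih (pfx ++ [v])
      have hlen : ((pfx ++ [v]).length : Int) = (pfx.length : Int) + 1 := by simp
      rw [hlen] at hrec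
      have hassoc : (pfx ++ [v]) ++ t' = pfx ++ v :: t' := by simp
      rw [hassoc] at hrec
      by_cases h : pvNE v <;> simp [h, hget, hrec]

theorem pvCnt_append_singleton (p : List String) (v : String) :
    pvCnt (p ++ [v]) = pvCnt p + (if pvNE v then 1 else 0) := by
  by_cases h : pvNE v <;> simp [pvCnt, List.filter_append, h]

-- the per-cell value A's mapping loop appends equals pvMval
theorem g_eq (h : List String) (k : Nat) (hk : k < h.length) (hne : pvNeiF 0 h ≠ []) :
    pvGval (pvNeiF 0 h) (pvBuildD (pvNeiF 0 h)) (k : Int) h[k] = pvMval h k := by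
  have hsplit : h = h.take k ++ h[k] :: h.drop (k+1) := by
    conv_lhs => rw [← List.take_append_drop k h]
    rw [List.drop_eq_getElem_cons hk]
  set P := h.take k with hP
  set S := h.drop (k+1) with hS
  set x := h[k] with hx
  set A1 := pvNeiF 0 P with hA1def
  set B := pvNeiF ((k:Int)+1) S with hBdef
  have hPlen : P.length = k := by simp [hP, List.length_take]; omega
  have hnei : pvNeiF 0 h = A1 ++ pvNeiF (k : Int) (x :: S) := by
    conv_lhs => rw [hsplit]
    rw [pvNeiF_append]
    congr 2
    rw [hPlen]; ring
  have hcons : pvNeiF (k:Int) (x :: S) = (if pvNE x then [(k:Int)] else []) ++ B := by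
    rw [pvNeiF_cons]
  have hA1lt : ∀ i ∈ A1, 0 ≤ i ∧ i < (k:Int) := by
    intro i hi
    have h2 := mem_pvNeiF 0 P i hi
    rw [hPlen] at h2
    omega
  have hBgt : ∀ i ∈ B, (k:Int) < i := by
    intro i hi
    have h2 := mem_pvNeiF _ S i hi
    omega
  have hMtake : h.take (k+1) = P ++ [x] := by
    conv_lhs => rw [hsplit]
    rw [show k+1 = P.length + 1 by omega, List.take_append]
    simp
  have hcntP : pvCnt P = A1.length := (length_pvNeiF 0 P).symm
  unfold pvGval pvMval
  rw [hMtake, pvCnt_append_singleton]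
  by_cases hxe : pvNE x
  · rw [if_pos hxe]
    have hneieq : pvNeiF 0 h = A1 ++ (k:Int) :: B := by
      rw [hnei, hcons, if_pos hxe]; rfl
    rw [hneieq]
    rw [getD_pvBuildD A1 B (k:Int)
      (fun hm => absurd ((hA1lt _ hm).2) (lt_irrefl _))
      (fun hm => absurd (hBgt _ hm) (lt_irrefl _))]
    rw [if_pos hxe, if_neg (by omega)]
    rw [hcntP]; push_cast; ring
  · rw [if_neg hxe]
    have hneieq : pvNeiF 0 h = A1 ++ B := by
      rw [hnei, hcons, if_neg hxe]; rfl
    rw [hneieq]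
    have hrevnone : B.reverse.find? (fun i => decide (i < (k:Int))) = none := by
      rw [List.find?_eq_none]
      intro i hi
      simp only [decide_eq_true_eq, not_lt]
      exact le_of_lt (hBgt i (List.mem_reverse.1 hi))
    rw [List.reverse_append, List.find?_append, hrevnone, Option.none_or]
    rcases eq_or_ne A1 [] with hA | hA
    · rw [hA]
      simp only [List.reverse_nil, List.find?_nil, List.nil_append]
      have hBne : B ≠ [] := by
        rw [hneieq, hA, List.nil_append] at hne
        exact hne
      obtain ⟨b, B', hB'⟩ := List.exists_cons_of_ne_nil hBne
      rw [hB', List.find?_cons_of_pos (by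
        simp only [decide_eq_true_eq]
        exact hBgt b (by rw [hB']; exact List.mem_cons_self))]
      rw [show (b :: B') = [] ++ b :: B' from rfl]
      have hnodB : (b :: B').Pairwise (· < ·) := by
        rw [← hB', hBdef]; exact pairwise_pvNeiF _ _
      have hbB' : b ∉ B' := fun hm => lt_irrefl b ((List.pairwise_cons.1 hnodB).1 b hm)
      show (pvBuildD ([] ++ b :: B')).getD b 0 = _
      rw [getD_pvBuildD [] B' b (by simp) hbB']
      have hcnt0 : pvCnt P = 0 := by rw [hcntP, hA]; rfl
      rw [if_pos (by simp [hxe, hcnt0])]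
      rfl
    · have hsplitA : A1.dropLast ++ [A1.getLast hA] = A1 := List.dropLast_append_getLast hA
      have hrev2 : A1.reverse = A1.getLast hA :: A1.dropLast.reverse := by
        conv_lhs => rw [← hsplitA]
        rw [List.reverse_append]
        rfl
      rw [hrev2, List.find?_cons_of_pos (by
        simp only [decide_eq_true_eq]
        exact (hA1lt _ (List.getLast_mem hA)).2)]
      have hLnotd : A1.getLast hA ∉ A1.dropLast := by
        have hp : A1.Pairwise (· < ·) := by rw [hA1def]; exact pairwise_pvNeiF 0 P
        rw [← hsplitA] at hp
        rcases List.pairwise_append.1 hp with ⟨_, _, hrel⟩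
        intro hm
        exact lt_irrefl _ (hrel _ hm _ (by simp))
      have hLB : A1.getLast hA ∉ B := fun hm =>
        absurd (hBgt _ hm) (not_lt.2 (le_of_lt (hA1lt _ (List.getLast_mem hA)).2))
      have happB : A1 ++ B = A1.dropLast ++ (A1.getLast hA) :: B := by
        conv_lhs => rw [← hsplitA]
        rw [List.append_assoc]
        rfl
      rw [happB]
      show (pvBuildD (A1.dropLast ++ A1.getLast hA :: B)).getD (A1.getLast hA) 0 = _
      rw [getD_pvBuildD _ _ _ hLnotd hLB]
      have hpos : 0 < A1.length := List.length_pos_of_ne_nil hA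
      rw [if_neg (by simp [hxe]; omega)]
      simp only [if_neg hxe]
      rw [List.length_dropLast, hcntP]
      omega

-- A computes the canonical pair when some cell is non-empty
theorem A_canon (h : List String) (hne : h ≠ []) (h1 : pvNeiF 0 h ≠ []) :
    collapse_header_py h = (h.filter pvNE, (List.range h.length).map (pvMval h)) := by
  unfold collapse_header_py
  rw [if_neg hne]
  show (if pvNeiF 0 h = [] then (h, PySem.List.pyRange 0 (h.length : Int) 1)
        else ((pvNeiF 0 h).map (fun idx => PySem.List.pyGetD h idx ""),
              (PySem.List.enumerate h 0).foldl
                (fun acc p => acc ++ [pvGval (pvNeiF 0 h) (pvBuildD (pvNeiF 0 h)) p.1 p.2]) []))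
      = (h.filter pvNE, (List.range h.length).map (pvMval h))
  rw [if_neg h1, PySem.List.foldl_append_singleton_eq_map, List.nil_append]
  refine Prod.ext ?_ ?_
  · simpa using map_pyGetD_pvNeiF h []
  · apply List.ext_getElem
    · simp [PySem.List.length_enumerate]
    · intro k hk1 hk2
      have hk : k < h.length := by simpa [PySem.List.length_enumerate] using hk1
      rw [List.getElem_map, PySem.List.getElem_enumerate, List.getElem_map, List.getElem_range]
      show pvGval (pvNeiF 0 h) (pvBuildD (pvNeiF 0 h)) (0 + (k:Int)) h[k] = pvMval h k
      rw [zero_add]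
      exact g_eq h k hk h1

theorem pvMval_prefix (p : List String) (v : String) (k : Nat) (hk : k < p.length) :
    pvMval (p++[v]) k = pvMval p k := by
  unfold pvMval; rw [List.take_append_of_le_length (by omega)]

theorem pvMval_last (p : List String) (v : String) :
    pvMval (p++[v]) p.length = if pvCnt (p++[v]) = 0 then 0 else (pvCnt (p++[v]) : Int) - 1 := by
  unfold pvMval
  rw [show p.length + 1 = (p++[v]).length by simp, List.take_length]

theorem pvStepB_canon (p : List String) (v : String) :
    pvStepB (p.filter pvNE, (List.range p.length).map (pvMval p), (pvCnt p : Int) - 1) v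
      = ((p++[v]).filter pvNE, (List.range (p++[v]).length).map (pvMval (p++[v])), (pvCnt (p++[v]) : Int) - 1) := by
  have hmapc : (List.range p.length).map (pvMval (p++[v])) = (List.range p.length).map (pvMval p) :=
    List.map_congr_left (fun k hk => pvMval_prefix p v k (List.mem_range.1 hk))
  have hrange : (List.range (p++[v]).length).map (pvMval (p++[v]))
      = (List.range p.length).map (pvMval p) ++ [pvMval (p++[v]) p.length] := by
    rw [show (p++[v]).length = p.length + 1 by simp, List.range_succ, List.map_append, hmapc]
    simp
  rw [hrange, pvMval_last]
  by_cases hv : pvNE v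
  · have hc : pvCnt (p++[v]) = pvCnt p + 1 := by rw [pvCnt_append_singleton]; simp [hv]
    have hfil : (p++[v]).filter pvNE = p.filter pvNE ++ [v] := by simp [List.filter_append, hv]
    have hlen : ((p.filter pvNE ++ [v]).length : Int) = (pvCnt p : Int) + 1 := by
      simp [pvCnt]
    simp only [pvStepB, if_pos hv, hfil, hc, Prod.mk.injEq]
    refine ⟨trivial, ?_, ?_⟩
    · congr 1
      rw [hlen, if_neg (by omega)]
      push_cast; rfl
    · rw [hlen]; push_cast; omega
  · have hc : pvCnt (p++[v]) = pvCnt p := by rw [pvCnt_append_singleton]; simp [hv]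
    have hfil : (p++[v]).filter pvNE = p.filter pvNE := by simp [List.filter_append, hv]
    simp only [pvStepB, if_neg hv, hfil, hc, Prod.mk.injEq]
    refine ⟨trivial, ?_, trivial⟩
    congr 1
    by_cases h0 : pvCnt p = 0
    · simp [h0]
    · rw [if_pos (by omega), if_neg h0]

-- B's loop invariant
theorem foldB (l p : List String) :
    l.foldl pvStepB (p.filter pvNE, (List.range p.length).map (pvMval p), (pvCnt p : Int) - 1)
      = ((p++l).filter pvNE, (List.range (p++l).length).map (pvMval (p++l)), (pvCnt (p++l) : Int) - 1) := by
  induction l generalizing p with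
  | nil => simp
  | cons v t ih =>
      rw [List.foldl_cons, pvStepB_canon, ih (p ++ [v])]
      simp

theorem B_eval (h : List String) :
    h.foldl pvStepB ([], [], -1)
      = (h.filter pvNE, (List.range h.length).map (pvMval h), (pvCnt h : Int) - 1) := by
  have := foldB h []
  simpa [pvCnt] using this

-- ===== VERDICT (by name: the statement is the Claim_ definition above) =====
theorem collapse_header_py_spec : Claim_equal_collapse_header_py := by
  intro header _
  unfold Spec_collapse_header_py collapse_header_py_alt
  rw [B_eval]
  by_cases hc : pvCnt header = 0
  · have hf : header.filter pvNE = [] := List.length_eq_zero_iff.1 hc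
    have hnei : pvNeiF 0 header = [] :=
      List.length_eq_zero_iff.1 (by rw [length_pvNeiF]; exact hc)
    by_cases hh : header = []
    · subst hh
      simp [collapse_header_py, hf, PySem.List.pyRange_one_eq_nil (le_refl 0)]
    · unfold collapse_header_py
      rw [if_neg hh]
      show (if ((PySem.List.enumerate header 0).filter (fun p => pvNE p.2)).map (fun p => p.1) = [] then _ else _) = _
      rw [show ((PySem.List.enumerate header 0).filter (fun p => pvNE p.2)).map (fun p => p.1) = pvNeiF 0 header from rfl, hnei]
      simp [hf]
  · have h1 : pvNeiF 0 header ≠ [] := by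
      intro hx
      exact hc (by rw [← length_pvNeiF 0 header, hx]; rfl)
    have hh : header ≠ [] := by rintro rfl; exact hc rfl
    rw [A_canon header hh h1]
    have hf : header.filter pvNE ≠ [] := by
      intro hx; exact hc (by rw [pvCnt, hx]; rfl)
    simp [hf]
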